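-- pv_equiv track=rewrite | github.com/cryptolets/cryptolets | analyze.py | drop_none_columns
-- ===== SOURCE A (Python) =====
-- def drop_none_columns(data):
--     """Remove any column where all values are None across rows."""
--     if not data:
--         return data
--
--     keys = list(data[0].keys())
--     keep_keys = []
--     for k in keys:
--         if any(row[k] is not None for row in data):
--             keep_keys.append(k)
--
--     # rebuild rows with only kept keys
--     new_data = [{k: row[k] for k in keep_keys} for row in data]
--     return new_data
-- ===== SOURCE B (Python) =====
-- def drop_none_columns(data):
--     """Remove any column where all values are None across rows."""
--     if not data:
--         return data
--
--     # transpose: one (key, column-of-values) pair per key of the first row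
--     cols = [(k, [row[k] for row in data]) for k in data[0].keys()]
--     # keep only columns with at least one non-None value
--     kept = [(k, vs) for (k, vs) in cols if not all(v is None for v in vs)]
--     # transpose back: rebuild each row by its index
--     return [{k: vs[i] for (k, vs) in kept} for i in range(len(data))]
-- ===== Notes on version B (the rewrite author's own statement) =====
-- stated objective: alternative
-- what changed: B transposes the table into (key, column) pairs, filters out all-None columns as whole lists, and rebuilds the rows by index from the kept columns, instead of A's per-key any() scan followed by per-row dict rebuilds via lookups.
import Mathlib
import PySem

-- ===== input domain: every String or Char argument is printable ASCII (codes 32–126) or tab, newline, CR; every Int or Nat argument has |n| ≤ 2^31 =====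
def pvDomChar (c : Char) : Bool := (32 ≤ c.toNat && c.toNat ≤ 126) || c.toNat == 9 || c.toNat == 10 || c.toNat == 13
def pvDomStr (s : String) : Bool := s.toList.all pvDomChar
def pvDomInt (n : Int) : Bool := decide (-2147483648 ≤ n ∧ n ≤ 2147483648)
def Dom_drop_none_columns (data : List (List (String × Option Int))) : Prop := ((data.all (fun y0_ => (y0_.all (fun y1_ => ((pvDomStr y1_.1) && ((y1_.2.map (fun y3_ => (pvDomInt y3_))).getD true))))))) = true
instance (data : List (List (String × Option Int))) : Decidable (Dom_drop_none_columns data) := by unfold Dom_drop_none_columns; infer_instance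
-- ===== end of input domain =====

-- B transposes the table into (key, column) pairs, drops all-None columns whole,
-- and rebuilds the rows by index — a different algorithm from A's per-key any() scan.

-- rows are Python dicts as association lists; row[k] is first-match lookup (none = KeyError, excluded by Pre_)
def pvLookup (row : List (String × Option Int)) (k : String) : Option Int :=
  (List.lookup k row).getD none

-- ===== PORT A =====
def drop_none_columns (data : List (List (String × Option Int))) : List (List (String × Option Int)) :=
  match data with
  | [] => []
  | row0 :: _ =>
    let keys := row0.map (·.1)
    let keep_keys := keys.foldl (fun acc k =>
      if data.any (fun row => (pvLookup row k).isSome) then acc ++ [k] else acc) []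
    data.map (fun row => keep_keys.map (fun k => (k, pvLookup row k)))

-- ===== PORT B =====
def drop_none_columns_alt (data : List (List (String × Option Int))) : List (List (String × Option Int)) :=
  match data with
  | [] => []
  | row0 :: _ =>
    let cols := row0.map (fun p => (p.1, data.map (fun row => pvLookup row p.1)))
    let kept := cols.filter (fun c => !(c.2.all Option.isNone))
    -- vs[i] is always in range (each column has length data.length), so getD is exact here
    (List.range data.length).map (fun i => kept.map (fun c => (c.1, c.2.getD i none)))

-- ===== PRECONDITION & SPEC =====
-- Pre_ excludes exactly the inputs where Python A (and B) raise KeyError: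
-- some row lacks a key of data[0].
def Pre_drop_none_columns (data : List (List (String × Option Int))) : Prop :=
  ∀ row ∈ data, ∀ p ∈ data.headD [], (List.lookup p.1 row).isSome = true
instance (data : List (List (String × Option Int))) : Decidable (Pre_drop_none_columns data) := by
  unfold Pre_drop_none_columns; infer_instance

def pvWitness_drop_none_columns : (List (List (String × Option Int))) :=
  [[("a", some 1), ("b", none)], [("a", none), ("b", some 2)]]

def Spec_drop_none_columns (data : List (List (String × Option Int))) (out : List (List (String × Option Int))) : Prop := out = drop_none_columns_alt data
instance (data : List (List (String × Option Int))) (out : List (List (String × Option Int))) : Decidable (Spec_drop_none_columns data out) := by unfold Spec_drop_none_columns; infer_instance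

-- ===== CLAIM (what is proved, stated in full; the proofs are below) =====
def Claim_equal_drop_none_columns : Prop := ∀ (data : List (List (String × Option Int))), Dom_drop_none_columns data → Pre_drop_none_columns data → Spec_drop_none_columns data (drop_none_columns data)

-- ===== LEMMAS AND PROOFS =====

-- a column is not all-None iff some row has a non-None value at that key
lemma col_pred_eq (data : List (List (String × Option Int))) (k : String) :
    (!((data.map (fun row => pvLookup row k)).all Option.isNone))
      = data.any (fun row => (pvLookup row k).isSome) := by
  induction data with
  | nil => rfl
  | cons r rs ih =>
    simp only [List.map_cons, List.all_cons, List.any_cons, ← ih, Bool.not_and]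
    cases pvLookup r k <;> simp

-- indexing a column recovers the row-wise lookup
lemma col_getD (data : List (List (String × Option Int))) (k : String) (i : Nat)
    (h : i < data.length) :
    (data.map (fun row => pvLookup row k)).getD i none = pvLookup data[i] k := by
  simp [List.getD, List.getElem?_map, List.getElem?_eq_getElem h]

-- ===== VERDICT (by name: the statement is the Claim_ definition above) =====
theorem drop_none_columns_spec : Claim_equal_drop_none_columns := by
  intro data _ _
  unfold Spec_drop_none_columns
  cases data with
  | nil => rfl
  | cons row0 rest =>
    simp only [drop_none_columns, drop_none_columns_alt]
    rw [PySem.List.foldl_append_if_eq_filter, List.nil_append, List.filter_map]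
    apply List.ext_getElem
    · simp
    · intro i h1 h2
      have hi : i < (row0 :: rest).length := by simpa using h1
      simp only [List.getElem_map, List.getElem_range]
      rw [List.filter_map, List.map_map]
      have hfil : List.filter
            ((fun c : String × List (Option Int) => !c.2.all Option.isNone) ∘
              (fun p : String × Option Int => (p.1, (row0 :: rest).map (fun row => pvLookup row p.1)))) row0
          = List.filter
            ((fun k => (row0 :: rest).any fun row => (pvLookup row k).isSome) ∘
              (fun x : String × Option Int => x.1)) row0 := by
        apply List.filter_congr
        intro p _
        simp only [Function.comp]
        exact col_pred_eq _ _
      rw [hfil, List.map_map]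
      apply List.map_congr_left
      intro p _
      simp only [Function.comp]
      rw [col_getD _ _ _ hi]
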